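-- pv_equiv track=rewrite | github.com/santha22/PythonPrograms | GFG/Greedy/shopInCandyStore.py | candyStore
-- ===== SOURCE A (Python) =====
-- def candyStore(candies, n, k):
--     # code here
--     mini, maxi = 0, 0
--     candies.sort()
--
--     val = n // (k + 1)
--     if n % (k + 1) != 0:
--         val += 1
--
--     for i in range(n):
--         if i < val:
--             mini += candies[i]
--
--     candies.reverse()
--
--     for i in range(n):
--         if i < val:
--             maxi += candies[i]
--
--     return [mini, maxi]
-- ===== SOURCE B (Python) =====
-- def candyStore(candies, n, k):
--     # Two-pointer selection: buy the cheapest, skip k most expensive as free;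
--     # mirrored on the reversed list for the max. No explicit ceil-division.
--     # Like A, mutates candies (ends sorted descending); return value proved equal.
--     candies.sort()
--     mini = 0
--     i, j = 0, n - 1
--     while i <= j:
--         mini += candies[i]
--         i += 1
--         j -= k
--     candies.reverse()
--     maxi = 0
--     i, j = 0, n - 1
--     while i <= j:
--         maxi += candies[i]
--         i += 1
--         j -= k
--     return [mini, maxi]
-- ===== Notes on version B (the rewrite author's own statement) =====
-- stated objective: alternative
-- what changed: Replaces A's explicit ceil-division count val and two filtered range(n) scans ('if i < val') by two-pointer while-loops (i advances, j retreats by k) that implicitly select the same cheapest/priciest groups.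
-- outside the precondition, e.g. on candyStore([1, 2, 3], 3, -2): A returns [0, 0], B raises IndexError
import Mathlib
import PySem

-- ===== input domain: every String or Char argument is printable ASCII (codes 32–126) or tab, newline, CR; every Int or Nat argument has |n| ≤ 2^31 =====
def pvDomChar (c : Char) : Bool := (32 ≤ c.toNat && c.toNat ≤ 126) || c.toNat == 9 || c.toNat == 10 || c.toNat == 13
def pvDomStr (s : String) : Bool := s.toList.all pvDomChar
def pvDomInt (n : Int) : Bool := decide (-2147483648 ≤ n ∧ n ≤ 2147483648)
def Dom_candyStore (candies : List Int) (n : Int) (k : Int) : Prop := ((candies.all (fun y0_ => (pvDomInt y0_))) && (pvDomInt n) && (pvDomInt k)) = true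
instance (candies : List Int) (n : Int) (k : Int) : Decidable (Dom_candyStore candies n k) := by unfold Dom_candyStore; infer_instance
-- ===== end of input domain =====

-- B replaces A's ceil-division count and filtered range scans by two-pointer loops;
-- both A and B sort/reverse candies in place (same mutation); equality proved on return values.

-- ===== PORT A =====
def candyStore (candies : List Int) (n : Int) (k : Int) : List Int :=
  let s := PySem.List.sorted candies id false
  -- val = n // (k+1) (+1 if remainder); k = -1 is ZeroDivisionError in Python, excluded by Pre_
  let val0 := PySem.Int.floordiv n (k + 1)
  let val := if PySem.Int.mod n (k + 1) ≠ 0 then val0 + 1 else val0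
  -- for i in range(n): if i < val: mini += candies[i]  (pyGetD: in range under Pre_)
  let mini := (PySem.List.pyRange 0 n 1).foldl
      (fun acc i => if i < val then acc + PySem.List.pyGetD s i 0 else acc) 0
  let r := s.reverse
  let maxi := (PySem.List.pyRange 0 n 1).foldl
      (fun acc i => if i < val then acc + PySem.List.pyGetD r i 0 else acc) 0
  [mini, maxi]

-- ===== PORT B =====
-- while i <= j: acc += xs[i]; i += 1; j -= k   — fuel bounds the iterations (≤ n+1 under Pre_,
-- where k ≥ 0 makes j - i strictly decrease); the none branch is Python's IndexError, outside Pre_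
def twoPtrSum (xs : List Int) (k : Int) : Nat → Int → Int → Int → Int
  | 0, _, _, acc => acc
  | fuel + 1, i, j, acc =>
    if i ≤ j then
      match PySem.List.pyGet? xs i with
      | some v => twoPtrSum xs k fuel (i + 1) (j - k) (acc + v)
      | none => acc
    else acc

def candyStore_alt (candies : List Int) (n : Int) (k : Int) : List Int :=
  let s := PySem.List.sorted candies id false
  let mini := twoPtrSum s k (n.toNat + 1) 0 (n - 1) 0
  let r := s.reverse
  let maxi := twoPtrSum r k (n.toNat + 1) 0 (n - 1) 0
  [mini, maxi]

-- ===== PRECONDITION & SPEC =====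
-- Pre_ excludes: k = -1 (A raises ZeroDivisionError); k ≥ 0 with ceil(n/(k+1)) > len (A raises
-- IndexError); and k ≤ -2 with n > 0, where A's floor division makes val ≤ 0 so A degenerately
-- returns [0, 0] while B's pointer loop runs off the list and raises IndexError.
def Pre_candyStore (candies : List Int) (n : Int) (k : Int) : Prop :=
  (0 ≤ k ∧ PySem.Int.floordiv (n + k) (k + 1) ≤ (candies.length : Int)) ∨ (n ≤ 0 ∧ k ≠ -1)
instance (candies : List Int) (n : Int) (k : Int) : Decidable (Pre_candyStore candies n k) := by
  unfold Pre_candyStore; infer_instance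
def pvWitness_candyStore : List Int × Int × Int := ([3, 1, 2], 3, 1)
def Spec_candyStore (candies : List Int) (n : Int) (k : Int) (out : List Int) : Prop := out = candyStore_alt candies n k
instance (candies : List Int) (n : Int) (k : Int) (out : List Int) : Decidable (Spec_candyStore candies n k out) := by unfold Spec_candyStore; infer_instance

-- ===== CLAIM (what is proved, stated in full; the proofs are below) =====
def Claim_equal_candyStore : Prop := ∀ (candies : List Int) (n : Int) (k : Int), Dom_candyStore candies n k → Pre_candyStore candies n k → Spec_candyStore candies n k (candyStore candies n k)

-- ===== LEMMAS AND PROOFS =====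

-- A's second half of the range: i ≥ val, the branch never fires
lemma foldl_if_none (val : Int) (g : Int → Int) (l : List Int) (acc : Int)
    (h : ∀ x ∈ l, ¬ x < val) :
    l.foldl (fun acc i => if i < val then acc + g i else acc) acc = acc := by
  induction l generalizing acc with
  | nil => rfl
  | cons x xs ih =>
    simp only [List.foldl_cons, if_neg (h x (by simp))]
    exact ih acc (fun y hy => h y (by simp [hy]))

-- A's first half of the range: i < val, the branch always fires
lemma foldl_if_all (val : Int) (g : Int → Int) (l : List Int) (acc : Int)
    (h : ∀ x ∈ l, x < val) :
    l.foldl (fun acc i => if i < val then acc + g i else acc) acc = acc + (l.map g).sum := by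
  induction l generalizing acc with
  | nil => simp
  | cons x xs ih =>
    simp only [List.foldl_cons, if_pos (h x (by simp)), List.map_cons, List.sum_cons]
    rw [ih (acc + g x) (fun y hy => h y (by simp [hy]))]
    ring

lemma map_getD_take (xs : List Int) (m : Nat) (hm : m ≤ xs.length) :
    (List.range m).map (fun t => xs.getD t 0) = xs.take m := by
  induction m with
  | zero => simp
  | succ m ih =>
    rw [List.range_succ, List.map_append, ih (by omega), List.take_add_one]
    simp [List.getD, List.getElem?_eq_getElem (show m < xs.length by omega)]

-- A's filtered range sum = sum of the first val elements
lemma aSum (xs : List Int) (n val : Int) (h0 : 0 ≤ val) (hvn : val ≤ n)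
    (hlen : val ≤ (xs.length : Int)) :
    (PySem.List.pyRange 0 n 1).foldl
      (fun acc i => if i < val then acc + PySem.List.pyGetD xs i 0 else acc) 0
      = (xs.take val.toNat).sum := by
  rw [PySem.List.pyRange_one_append 0 val n h0 hvn, List.foldl_append]
  rw [foldl_if_none val _ _ _ (by
    intro x hx
    rw [PySem.List.mem_pyRange_one] at hx
    omega)]
  rw [foldl_if_all val _ _ _ (by
    intro x hx
    rw [PySem.List.mem_pyRange_one] at hx
    omega)]
  rw [PySem.List.pyRange_one, List.map_map]
  have : ((fun i => PySem.List.pyGetD xs i 0) ∘ fun t : Nat => (0 : Int) + ↑t)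
      = fun t : Nat => xs.getD t 0 := by
    funext t
    simp [PySem.List.pyGetD_natCast]
  rw [this]
  have hvt : (val - 0).toNat = val.toNat := by omega
  rw [hvt, map_getD_take xs val.toNat (by omega)]
  simp

-- B's two-pointer loop sums exactly r = (j - i) / (k+1) + 1 consecutive elements
lemma twoPtrSum_eq (xs : List Int) (k : Int) (hk : 0 ≤ k) :
    ∀ (fuel : Nat) (a : Nat) (j acc : Int) (r : Nat),
      ((r : Int) = if (a : Int) ≤ j then (j - a)/ (k + 1) + 1 else 0) →
      r ≤ fuel → a + r ≤ xs.length →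
      twoPtrSum xs k fuel (a : Int) j acc = acc + ((xs.drop a).take r).sum := by
  intro fuel
  induction fuel with
  | zero =>
    intro a j acc r hr hf _
    have : r = 0 := by omega
    subst this
    simp [twoPtrSum]
  | succ fuel ih =>
    intro a j acc r hr hf hlen
    by_cases h : (a : Int) ≤ j
    · rw [if_pos h] at hr
      have hd : (0 : Int) < k + 1 := by omega
      have hq : 0 ≤ (j - a)/ (k + 1) := Int.ediv_nonneg (by omega) (by omega)
      have hr1 : 1 ≤ r := by omega
      have halen : a < xs.length := by omega
      simp only [twoPtrSum, if_pos h, PySem.List.pyGet?_natCast,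
        List.getElem?_eq_getElem halen]
      have hcast : (a : Int) + 1 = ((a + 1 : Nat) : Int) := by push_cast; ring
      rw [hcast]
      rw [ih (a + 1) (j - k) (acc + xs[a]) (r - 1) ?_ (by omega) (by omega)]
      · rw [List.drop_eq_getElem_cons halen]
        have : r = (r - 1) + 1 := by omega
        rw [this, List.take_succ_cons, List.sum_cons]
        have hrr : (r - 1) + 1 - 1 = r - 1 := by omega
        rw [hrr]
        ring
      · by_cases h2 : ((a + 1 : Nat) : Int) ≤ j - k
        · rw [if_pos h2]
          have : j - (a : Int) = (j - k - (a : Int) - 1) + 1 * (k + 1) := by ring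
          rw [this, Int.add_mul_ediv_right _ _ (by omega : k + 1 ≠ 0)] at hr
          have he2 : j - k - ↑a - 1 = j - k - ((a : Int) + 1) := by ring
          rw [he2] at hr
          push_cast at h2 ⊢
          omega
        · rw [if_neg h2]
          push_cast at h2
          have : (j - a)/ (k + 1) = 0 :=
            Int.ediv_eq_zero_of_lt (by omega) (by omega)
          omega
    · rw [if_neg h] at hr
      have : r = 0 := by omega
      subst this
      simp [twoPtrSum, if_neg h]

-- ceil(n/(k+1)) as A computes it equals (n-1)/(k+1) + 1 for n >= 1
lemma ceil_eq (n k : Int) (_hn : 1 ≤ n) (hk : 0 ≤ k) :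
    (if n % (k + 1) ≠ 0 then n / (k + 1) + 1 else n / (k + 1))
      = (n - 1) / (k + 1) + 1 := by
  set d := k + 1 with hd
  have hd0 : 0 < d := by omega
  have h1 := Int.mul_ediv_add_emod n d
  have h2 : 0 ≤ n % d := Int.emod_nonneg n (by omega)
  have h3 : n % d < d := Int.emod_lt_of_pos n hd0
  by_cases hz : n % d = 0
  · rw [if_neg (by simpa using hz)]
    have he : n - 1 = (d - 1) + (n / d - 1) * d := by linear_combination hz - h1
    rw [he, Int.add_mul_ediv_right _ _ (by omega : d ≠ 0)]
    have hz2 : (d - 1) / d = 0 := Int.ediv_eq_zero_of_lt (by omega) (by omega)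
    omega
  · rw [if_pos (by simpa using hz)]
    have he : n - 1 = (n % d - 1) + (n / d) * d := by linear_combination -h1
    rw [he, Int.add_mul_ediv_right _ _ (by omega : d ≠ 0)]
    have hz2 : (n % d - 1) / d = 0 := Int.ediv_eq_zero_of_lt (by omega) (by omega)
    omega

-- the B-side loop at its call site, for n ≥ 1
lemma alt_sum (xs : List Int) (n k : Int) (hk : 0 ≤ k) (hn : 1 ≤ n)
    (hlen : (n - 1)/ (k + 1) + 1 ≤ (xs.length : Int)) :
    twoPtrSum xs k (n.toNat + 1) 0 (n - 1) 0
      = (xs.take ((n - 1)/ (k + 1) + 1).toNat).sum := by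
  have hq : 0 ≤ (n - 1)/ (k + 1) := Int.ediv_nonneg (by omega) (by omega)
  have hle : (n - 1)/ (k + 1) ≤ n - 1 := Int.ediv_le_self _ (by omega)
  have h := twoPtrSum_eq xs k hk (n.toNat + 1) 0 (n - 1) 0
      ((n - 1)/ (k + 1) + 1).toNat (by simp; omega) (by omega) (by omega)
  simpa using h

-- ===== VERDICT (by name: the statement is the Claim_ definition above) =====
theorem candyStore_spec : Claim_equal_candyStore := by
  intro candies n k _ hpre
  unfold Spec_candyStore candyStore candyStore_alt
  by_cases hn : n ≤ 0
  · -- both loops are empty: A's range(n) is [], B's guard 0 ≤ n-1 fails at once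
    have h1 : PySem.List.pyRange 0 n 1 = [] := PySem.List.pyRange_one_eq_nil (by omega)
    have h2 : n.toNat = 0 := by omega
    have hng : ¬ (0 : Int) ≤ n - 1 := by omega
    simp only [h1, h2, List.foldl_nil, twoPtrSum, if_neg hng]
  · -- n ≥ 1 forces the first disjunct of Pre_
    have hn1 : 1 ≤ n := by omega
    have hk : 0 ≤ k ∧ PySem.Int.floordiv (n + k) (k + 1) ≤ (candies.length : Int) := by
      rcases hpre with h | h
      · exact h
      · omega
    obtain ⟨hk0, hlen⟩ := hk
    have hd : (0 : Int) < k + 1 := by omega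
    rw [PySem.Int.floordiv_eq_ediv_of_pos hd] at hlen
    have hsplit : n + k = (n - 1) + 1 * (k + 1) := by ring
    rw [hsplit, Int.add_mul_ediv_right _ _ (by omega : k + 1 ≠ 0)] at hlen
    -- hlen : (n-1).ediv (k+1) + 1 ≤ len
    set r : Int := (n - 1)/ (k + 1) + 1 with hrdef
    have hq : 0 ≤ (n - 1)/ (k + 1) := Int.ediv_nonneg (by omega) (by omega)
    have hle : (n - 1)/ (k + 1) ≤ n - 1 := Int.ediv_le_self _ (by omega)
    have hslen : ((PySem.List.sorted candies id false).length : Int) = (candies.length : Int) := by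
      rw [PySem.List.length_sorted]
    have hval : (if PySem.Int.mod n (k + 1) ≠ 0 then PySem.Int.floordiv n (k + 1) + 1
        else PySem.Int.floordiv n (k + 1)) = r := by
      rw [PySem.Int.floordiv_eq_ediv_of_pos hd, PySem.Int.mod_eq_emod_of_pos hd]
      exact ceil_eq n k (by omega) hk0
    simp only [hval]
    rw [aSum _ n r (by omega) (by omega) (by rw [hslen]; omega)]
    rw [aSum _ n r (by omega) (by omega) (by rw [List.length_reverse, hslen]; omega)]
    rw [alt_sum _ n k hk0 (by omega) (by rw [hslen]; omega)]
    rw [alt_sum _ n k hk0 (by omega) (by rw [List.length_reverse, hslen]; omega)]
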